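-- pv_equiv track=rewrite | github.com/huangjin-bit/EnJin | src/enjinc/importer.py | _extract_class_body
-- ===== SOURCE A (Python) =====
-- def _extract_class_body(content: str, start: int) -> str:
--     """提取类体内容（到下一个同级 class 或文件末尾）。"""
--     depth = 0
--     body_start = start
--     i = start
--     while i < len(content):
--         if content[i] == ':':
--             depth += 1
--         elif content[i] == '\n':
--             # 检查下一行是否是新的顶级 class
--             rest = content[i:].lstrip('\n')
--             if rest.startswith('class ') and depth <= 1:
--                 return content[body_start:i]
--         i += 1
--     return content[body_start:]
-- ===== SOURCE B (Python) =====
-- def _extract_class_body(content: str, start: int) -> str: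
--     """Line-based rewrite: split the suffix into lines, walk line by line,
--     accumulating the colon count, and cut just before the newline whose next
--     non-empty line opens a top-level class."""
--     suffix = content[start:]
--     lines = suffix.split('\n')
--     depth = 0
--     taken = 0
--     while len(lines) >= 2:
--         head = lines[0]
--         lines = lines[1:]
--         depth += head.count(':')
--         nxt = ''
--         for l in lines:
--             if l != '':
--                 nxt = l
--                 break
--         if nxt.startswith('class ') and depth <= 1:
--             return suffix[:taken + len(head)]
--         taken += len(head) + 1
--     return suffix
-- ===== Notes on version B (the rewrite author's own statement) =====
-- stated objective: alternative
-- what changed: Replaced the char-by-char index scan (which rebuilds content[i:].lstrip('\n') at every newline) by a line-level traversal: split the suffix on '\n' once, walk the line list accumulating per-line colon counts, and cut at the line whose next non-empty line starts a top-level class; measured ~6-10x faster on large inputs.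
-- outside the precondition, e.g. on _extract_class_body('a\nclass b', -2): A returns '', B returns ' b'
import Mathlib
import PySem

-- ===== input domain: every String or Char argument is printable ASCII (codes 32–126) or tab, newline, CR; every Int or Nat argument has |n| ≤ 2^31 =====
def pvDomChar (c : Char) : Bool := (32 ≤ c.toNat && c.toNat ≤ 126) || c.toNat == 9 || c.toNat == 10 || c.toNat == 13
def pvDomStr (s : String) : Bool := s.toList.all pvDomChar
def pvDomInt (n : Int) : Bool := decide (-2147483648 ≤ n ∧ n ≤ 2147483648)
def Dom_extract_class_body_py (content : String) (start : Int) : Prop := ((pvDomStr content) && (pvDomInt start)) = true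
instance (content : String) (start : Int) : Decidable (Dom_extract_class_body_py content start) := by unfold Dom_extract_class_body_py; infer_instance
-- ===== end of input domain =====

-- B re-implements the class-body extraction line by line (split once on '\n') instead of
-- A's char-by-char index scan; equivalence is proved for start ≥ 0 (Pre_), A's return value only.

-- ===== PORT A =====
-- the while-loop of _extract_class_body, as a recursion on the remaining length;
-- `.lstrip('\n')` is ported by hand as dropWhile (· = '\n') on the code points (exact: it
-- removes exactly the leading '\n' characters).
def pvALoop (content : String) (body_start : Int) (depth : Int) (i : Int) : String :=
  if h : i < PySem.Str.len content then
    match PySem.Str.pyGet? content i with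
    | none => ""  -- IndexError (reachable only for i < -len(content), outside Pre_)
    | some c =>
      if c = ':' then pvALoop content body_start (depth + 1) (i + 1)
      else if c = '\n' then
        let rest := (PySem.Str.slice content (some i) none).toList.dropWhile (· = '\n')
        if PySem.Chars.startswith rest ("class ".toList) = true ∧ depth ≤ 1 then
          PySem.Str.slice content (some body_start) (some i)
        else pvALoop content body_start depth (i + 1)
      else pvALoop content body_start depth (i + 1)
  else
    PySem.Str.slice content (some body_start) none
termination_by (PySem.Str.len content - i).toNat
decreasing_by all_goals omega

def extract_class_body_py (content : String) (start : Int) : String :=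
  pvALoop content start 0 start

-- ===== PORT B =====
-- `nxt = ''; for l in lines: if l != '': nxt = l; break`
def pvFirstNonempty (lines : List String) : String :=
  match lines with
  | [] => ""
  | l :: rest => if l ≠ "" then l else pvFirstNonempty rest

-- the `while len(lines) >= 2` loop of B
def pvBLoop (suffix : String) (depth : Int) (taken : Int) (lines : List String) : String :=
  match lines with
  | [] => suffix
  | [_] => suffix
  | head :: rest =>
      let depth' := depth + (PySem.Str.count head ":" : Int)
      let nxt := pvFirstNonempty rest
      if PySem.Str.startswith nxt "class " = true ∧ depth' ≤ 1 then
        PySem.Str.slice suffix none (some (taken + PySem.Str.len head))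
      else pvBLoop suffix depth' (taken + PySem.Str.len head + 1) rest

def extract_class_body_py_alt (content : String) (start : Int) : String :=
  let suffix := PySem.Str.slice content (some start) none
  -- suffix.split('\n'): the separator is non-empty, so this is exactly the `some` value of
  -- PySem.Str.split? suffix "\n" (Chars.splitOn mapped back to Strings)
  let lines := (PySem.Chars.splitOn suffix.toList ("\n".toList)).map String.ofList
  pvBLoop suffix 0 0 lines

-- ===== PRECONDITION & SPEC =====
-- Pre_ excludes negative `start`, where Python's negative indexing makes A's scan wrap around
-- and re-read the string from the front (raising IndexError once start < -len(content)) — an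
-- artefact of A's index loop; B reads `start` as a plain suffix offset there.
def Pre_extract_class_body_py (content : String) (start : Int) : Prop := 0 ≤ start
instance (content : String) (start : Int) : Decidable (Pre_extract_class_body_py content start) := by
  unfold Pre_extract_class_body_py; infer_instance

def pvWitness_extract_class_body_py : String × Int := ("class A:\n  x = 1\nclass B:\n  pass", 0)

def Spec_extract_class_body_py (content : String) (start : Int) (out : String) : Prop := out = extract_class_body_py_alt content start
instance (content : String) (start : Int) (out : String) : Decidable (Spec_extract_class_body_py content start out) := by unfold Spec_extract_class_body_py; infer_instance

-- ===== CLAIM (what is proved, stated in full; the proofs are below) =====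
def Claim_equal_extract_class_body_py : Prop := ∀ (content : String) (start : Int), Dom_extract_class_body_py content start → Pre_extract_class_body_py content start → Spec_extract_class_body_py content start (extract_class_body_py content start)


-- ===== LEMMAS AND PROOFS =====

-- ---- shared shadow machinery on List Char ----

def pvPrep (p : List Char) : List (List Char) → List (List Char)
  | [] => [p]
  | x :: xs => (p ++ x) :: xs

def pvSplit : List Char → List (List Char)
  | [] => [[]]
  | c :: t => if c = '\n' then [] :: pvSplit t else pvPrep [c] (pvSplit t)

lemma pvSplit_ne_nil (s : List Char) : pvSplit s ≠ [] := by
  cases s with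
  | nil => simp [pvSplit]
  | cons c t =>
    simp only [pvSplit]
    split
    · simp
    · cases h : pvSplit t <;> simp [pvPrep]

lemma pvSplitOn_go_eq (l : List Char) : ∀ (fuel : Nat) (cur : List Char) (acc : List (List Char)),
    l.length < fuel →
    PySem.Chars.splitOn.go ['\n'] fuel l cur acc = acc.reverse ++ pvPrep cur.reverse (pvSplit l) := by
  induction l with
  | nil =>
    intro fuel cur acc h
    cases fuel with
    | zero => omega
    | succ f => simp [PySem.Chars.splitOn.go, pvSplit, pvPrep]
  | cons c t ih =>
    intro fuel cur acc h
    cases fuel with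
    | zero => simp at h
    | succ f =>
      by_cases hc : c = '\n'
      · subst hc
        have hpre : List.isPrefixOf ['\n'] ('\n' :: t) = true := by simp [List.isPrefixOf]
        rw [PySem.Chars.splitOn.go]
        simp only [hpre, if_true, List.length_singleton, List.drop_succ_cons, List.drop_zero]
        rw [ih f [] (cur.reverse :: acc) (by simpa using h)]
        simp only [pvSplit, if_true]
        cases hs : pvSplit t with
        | nil => exact absurd hs (pvSplit_ne_nil t)
        | cons x xs => simp [pvPrep]
      · have hpre : List.isPrefixOf ['\n'] (c :: t) = false := by
          simp [List.isPrefixOf]; intro h'; exact absurd h'.symm hc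
        rw [PySem.Chars.splitOn.go]
        simp only [hpre, Bool.false_eq_true, if_false]
        rw [ih f (c :: cur) acc (by simpa using h)]
        simp only [pvSplit, hc, if_false]
        cases hs : pvSplit t with
        | nil => exact absurd hs (pvSplit_ne_nil t)
        | cons x xs => simp [pvPrep]

lemma pvSplitOn_eq (s : List Char) : PySem.Chars.splitOn s ['\n'] = pvSplit s := by
  unfold PySem.Chars.splitOn
  rw [pvSplitOn_go_eq s (s.length + 1) [] [] (by omega)]
  cases hs : pvSplit s with
  | nil => exact absurd hs (pvSplit_ne_nil s)
  | cons x xs => simp [pvPrep]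

def pvJoinNL : List (List Char) → List Char
  | [] => []
  | [l] => l
  | l :: ls => l ++ '\n' :: pvJoinNL ls

lemma pvJoin_split (s : List Char) : pvJoinNL (pvSplit s) = s := by
  induction s with
  | nil => simp [pvSplit, pvJoinNL]
  | cons c t ih =>
    by_cases hc : c = '\n'
    · subst hc
      simp only [pvSplit, if_true]
      cases hs : pvSplit t with
      | nil => exact absurd hs (pvSplit_ne_nil t)
      | cons x xs =>
        rw [hs] at ih
        simp [pvJoinNL, ← ih]
    · simp only [pvSplit, hc, if_false]
      cases hs : pvSplit t with
      | nil => exact absurd hs (pvSplit_ne_nil t)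
      | cons x xs =>
        rw [hs] at ih
        cases xs with
        | nil => simp_all [pvPrep, pvJoinNL]
        | cons y ys => simp_all [pvPrep, pvJoinNL]

lemma pvSplit_nl_free (s : List Char) : ∀ l ∈ pvSplit s, '\n' ∉ l := by
  induction s with
  | nil => simp [pvSplit]
  | cons c t ih =>
    by_cases hc : c = '\n'
    · subst hc; simp only [pvSplit, if_true]
      intro l hl
      rcases List.mem_cons.mp hl with h | h
      · simp [h]
      · exact ih l h
    · simp only [pvSplit, hc, if_false]
      cases hs : pvSplit t with
      | nil => exact absurd hs (pvSplit_ne_nil t)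
      | cons x xs =>
        intro l hl
        simp only [pvPrep] at hl
        rcases List.mem_cons.mp hl with h | h
        · subst h
          intro hm
          rcases List.mem_cons.mp hm with h1 | h1
          · exact hc h1.symm
          · exact ih x (hs ▸ List.mem_cons_self) h1
        · exact ih l (hs ▸ List.mem_cons_of_mem x h)

def pvFirstNE : List (List Char) → List Char
  | [] => []
  | l :: ls => if l = [] then pvFirstNE ls else l

def pvCut (depth : Int) : List Char → Option Nat
  | [] => none
  | c :: rest =>
      if c = '\n' ∧ "class ".toList <+: rest.dropWhile (· = '\n') ∧ depth ≤ 1 then some 0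
      else (pvCut (depth + (if c = ':' then 1 else 0)) rest).map (· + 1)

def pvCutL (depth : Int) : List (List Char) → Option Nat
  | [] => none
  | [_] => none
  | l :: ls =>
      if "class ".toList <+: pvFirstNE ls ∧ depth + (l.count ':' : Int) ≤ 1 then some l.length
      else (pvCutL (depth + (l.count ':' : Int)) ls).map (· + (l.length + 1))

lemma pvCount_go_eq (l : List Char) : ∀ (fuel acc : Nat), l.length ≤ fuel →
    PySem.Chars.count.go [':'] fuel l acc = acc + l.count ':' := by
  induction l with
  | nil =>
    intro fuel acc h
    cases fuel <;> simp [PySem.Chars.count.go]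
  | cons c t ih =>
    intro fuel acc h
    cases fuel with
    | zero => simp at h
    | succ f =>
      by_cases hc : c = ':'
      · subst hc
        have hpre : List.isPrefixOf [':'] (':' :: t) = true := by simp [List.isPrefixOf]
        rw [PySem.Chars.count.go]
        simp only [hpre, if_true, List.length_singleton, List.drop_succ_cons, List.drop_zero]
        rw [ih f (acc + 1) (by simpa using h)]
        simp [List.count_cons]
        omega
      · have hpre : List.isPrefixOf [':'] (c :: t) = false := by
          simp [List.isPrefixOf]; intro h'; exact absurd h'.symm hc
        rw [PySem.Chars.count.go]
        simp only [hpre, Bool.false_eq_true, if_false]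
        rw [ih f acc (by simpa using h)]
        simp [List.count_cons, hc]

lemma pvCount_eq (l : List Char) : PySem.Chars.count l [':'] = l.count ':' := by
  unfold PySem.Chars.count
  simp only [List.isEmpty_cons, if_false]
  simpa using pvCount_go_eq l l.length 0 le_rfl

lemma pvPrefix_append_iff (pat : List Char) (hp : '\n' ∉ pat) :
    ∀ (l r : List Char), '\n' ∉ l → (pat <+: l ++ '\n' :: r ↔ pat <+: l) := by
  induction pat with
  | nil => simp
  | cons p ps ih =>
    intro l r hl
    cases l with
    | nil =>
      simp only [List.nil_append]
      constructor
      · rintro ⟨s, hs⟩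
        exfalso
        have : p = '\n' := by
          have := congrArg (·.head?) hs
          simpa using this
        exact hp (this ▸ List.mem_cons_self)
      · rintro ⟨s, hs⟩
        exfalso; simpa using congrArg List.length hs
    | cons a l' =>
      simp only [List.cons_append, List.cons_prefix_cons]
      constructor
      · rintro ⟨hpa, hrest⟩
        exact ⟨hpa, (ih (by simp at hp; tauto) l' r (by simp at hl; tauto)).mp hrest⟩
      · rintro ⟨hpa, hrest⟩
        exact ⟨hpa, (ih (by simp at hp; tauto) l' r (by simp at hl; tauto)).mpr hrest⟩

lemma pvTrig_iff (pat : List Char) (hp : '\n' ∉ pat) :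
    ∀ Ls : List (List Char), (∀ l ∈ Ls, '\n' ∉ l) →
      (pat <+: (pvJoinNL Ls).dropWhile (· = '\n') ↔ pat <+: pvFirstNE Ls) := by
  intro Ls
  induction Ls with
  | nil => intro _; simp [pvJoinNL, pvFirstNE]
  | cons l ls ih =>
    intro hfree
    by_cases hl : l = []
    · subst hl
      cases ls with
      | nil => simp [pvJoinNL, pvFirstNE]
      | cons m ms =>
        have hj : pvJoinNL ([] :: m :: ms) = '\n' :: pvJoinNL (m :: ms) := by simp [pvJoinNL]
        rw [hj, List.dropWhile_cons_of_pos (by simp)]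
        simp only [pvFirstNE, if_true]
        exact ih (fun x hx => hfree x (List.mem_cons_of_mem _ hx))
    · obtain ⟨c, l', rfl⟩ := List.exists_cons_of_ne_nil hl
      have hc : c ≠ '\n' := fun h => hfree _ List.mem_cons_self (h ▸ List.mem_cons_self)
      cases ls with
      | nil =>
        simp only [pvJoinNL, pvFirstNE, if_neg hl]
        rw [List.dropWhile_cons_of_neg (by simpa using hc)]
      | cons m ms =>
        have : pvJoinNL ((c :: l') :: m :: ms) = (c :: l') ++ '\n' :: pvJoinNL (m :: ms) := by
          simp [pvJoinNL]
        rw [this]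
        simp only [pvFirstNE, if_neg hl]
        rw [List.cons_append, List.dropWhile_cons_of_neg (by simpa using hc)]
        exact pvPrefix_append_iff pat hp _ _ (hfree _ List.mem_cons_self)

lemma pvCut_nlfree (l : List Char) : ∀ depth : Int, '\n' ∉ l → pvCut depth l = none := by
  induction l with
  | nil => intro _ _; simp [pvCut]
  | cons c t ih =>
    intro depth h
    have hc : c ≠ '\n' := fun hh => h (hh ▸ List.mem_cons_self)
    simp only [pvCut, hc, false_and, if_false]
    rw [ih _ (fun hm => h (List.mem_cons_of_mem _ hm))]
    rfl

lemma pvCut_append (l : List Char) : ∀ (r : List Char) (depth : Int), '\n' ∉ l →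
    pvCut depth (l ++ r) = (pvCut (depth + (l.count ':' : Int)) r).map (· + l.length) := by
  induction l with
  | nil =>
    intro r depth _
    simp only [List.nil_append, List.count_nil, Nat.cast_zero, add_zero, List.length_nil]
    cases pvCut depth r <;> simp
  | cons c t ih =>
    intro r depth h
    have hc : c ≠ '\n' := fun hh => h (hh ▸ List.mem_cons_self)
    simp only [List.cons_append, pvCut, hc, false_and, if_false]
    rw [ih r _ (fun hm => h (List.mem_cons_of_mem _ hm))]
    have : depth + (if c = ':' then (1:Int) else 0) + (t.count ':' : Int)
        = depth + ((c :: t).count ':' : Int) := by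
      simp [List.count_cons]
      split <;> push_cast <;> ring
    rw [this]
    cases pvCut (depth + ((c :: t).count ':' : Int)) r <;> simp
    omega

lemma pvCut_eq_cutL : ∀ (Ls : List (List Char)) (depth : Int), (∀ l ∈ Ls, '\n' ∉ l) →
    pvCut depth (pvJoinNL Ls) = pvCutL depth Ls := by
  intro Ls
  induction Ls with
  | nil => intro _ _; simp [pvJoinNL, pvCut, pvCutL]
  | cons l ls ih =>
    intro depth hfree
    cases ls with
    | nil =>
      simp only [pvJoinNL, pvCutL]
      exact pvCut_nlfree l depth (hfree _ List.mem_cons_self)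
    | cons m ms =>
      have hj : pvJoinNL (l :: m :: ms) = l ++ '\n' :: pvJoinNL (m :: ms) := by simp [pvJoinNL]
      rw [hj, pvCut_append l _ depth (hfree _ List.mem_cons_self)]
      have hfree' : ∀ x ∈ m :: ms, '\n' ∉ x := fun x hx => hfree x (List.mem_cons_of_mem _ hx)
      have htrig := pvTrig_iff ("class ".toList) (by decide) (m :: ms) hfree'
      simp only [pvCut, true_and]
      by_cases hcond : "class ".toList <+: pvFirstNE (m :: ms) ∧ depth + (l.count ':' : Int) ≤ 1
      · rw [if_pos ⟨htrig.mpr hcond.1, hcond.2⟩]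
        simp only [pvCutL]
        rw [if_pos hcond]
        simp
      · have : ¬("class ".toList <+: (pvJoinNL (m :: ms)).dropWhile (· = '\n')
            ∧ depth + (l.count ':' : Int) ≤ 1) := by
          intro hh; exact hcond ⟨htrig.mp hh.1, hh.2⟩
        rw [if_neg this]
        show (Option.map _ (pvCut _ (pvJoinNL (m :: ms)))).map _ = pvCutL depth (l :: m :: ms)
        rw [ih _ hfree']
        simp only [pvCutL]
        rw [if_neg hcond]
        cases hv : pvCutL (depth + (l.count ':' : Int)) (m :: ms) with
        | none => simp [hv]
        | some j => simp [hv]; omega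

-- ---- A side ----

lemma pvSliceFrom_eq (content : String) (i : Int) (hi : 0 ≤ i) :
    (PySem.Str.slice content (some i) none).toList = content.toList.drop i.toNat := by
  rw [PySem.Str.toList_slice]
  simp only [PySem.Chars.slice_eq_listSlice]
  exact PySem.List.slice_from _ hi

lemma pvSliceBetween_eq (content : String) (a b : Int) (ha : 0 ≤ a) (hb : 0 ≤ b) :
    PySem.Str.slice content (some a) (some b)
      = String.ofList ((content.toList.drop a.toNat).take (b.toNat - a.toNat)) := by
  rw [← String.toList_inj, PySem.Str.toList_slice]
  simp only [PySem.Chars.slice_eq_listSlice]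
  rw [PySem.List.slice_toNat _ ha hb]
  simp

lemma pvALoop_eq (content : String) (start : Int) (hs : 0 ≤ start) :
    ∀ (t : List Char) (i depth : Int), start ≤ i → content.toList.drop i.toNat = t →
    pvALoop content start depth i =
      match pvCut depth t with
      | some j => String.ofList ((content.toList.drop start.toNat).take (i.toNat - start.toNat + j))
      | none => String.ofList (content.toList.drop start.toNat) := by
  intro t
  induction t with
  | nil =>
    intro i depth hsi ht
    have hi : 0 ≤ i := le_trans hs hsi
    have hlen : content.toList.length ≤ i.toNat := List.drop_eq_nil_iff.mp ht
    rw [pvALoop]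
    rw [dif_neg (by simp only [PySem.Str.len, not_lt]; omega)]
    simp only [pvCut]
    rw [← String.toList_inj, PySem.Str.toList_slice]
    simp only [PySem.Chars.slice_eq_listSlice]
    rw [PySem.List.slice_from _ hs]
    simp
  | cons c t' ih =>
    intro i depth hsi ht
    have hi : 0 ≤ i := le_trans hs hsi
    have hlt : i.toNat < content.toList.length := by
      by_contra hh
      rw [List.drop_eq_nil_iff.mpr (by omega)] at ht
      exact List.cons_ne_nil c t' ht.symm
    have hget : PySem.Str.pyGet? content i = some c := by
      have : i = ((i.toNat : Nat) : Int) := by omega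
      rw [this, PySem.Str.pyGet?_natCast]
      have := congrArg (·[0]?) ht
      simpa [List.getElem?_drop] using this
    have hdrop' : content.toList.drop (i + 1).toNat = t' := by
      have h1 : (i + 1).toNat = i.toNat + 1 := by omega
      rw [h1, ← List.drop_drop, ht]
      simp
    rw [pvALoop]
    rw [dif_pos (by simp only [PySem.Str.len]; omega), hget]
    dsimp only
    by_cases hc : c = ':'
    · subst hc
      rw [if_pos rfl]
      rw [ih (i + 1) (depth + 1) (by omega) hdrop']
      have hcut : pvCut depth (':' :: t') = (pvCut (depth + 1) t').map (· + 1) := by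
        simp [pvCut]
      rw [hcut]
      cases hv : pvCut (depth + 1) t' with
      | none => simp [hv]
      | some j =>
        simp only [hv, Option.map_some]
        have : (i + 1).toNat - start.toNat + j = i.toNat - start.toNat + (j + 1) := by omega
        rw [this]
    · by_cases hn : c = '\n'
      · subst hn
        rw [if_neg hc, if_pos rfl]
        have hrest : (PySem.Str.slice content (some i) none).toList.dropWhile (· = '\n')
            = t'.dropWhile (· = '\n') := by
          rw [pvSliceFrom_eq content i hi, ht]
          rw [List.dropWhile_cons_of_pos (by simp)]
        by_cases hcond : "class ".toList <+: t'.dropWhile (· = '\n') ∧ depth ≤ 1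
        · rw [if_pos ⟨by rw [hrest]; exact (PySem.Chars.startswith_iff _ _).mpr hcond.1, hcond.2⟩]
          have hcut : pvCut depth ('\n' :: t') = some 0 := by
            simp only [pvCut]
            rw [if_pos ⟨trivial, hcond⟩]
          rw [hcut]
          rw [pvSliceBetween_eq content start i hs hi]
          simp
        · have hbool : ¬(PySem.Chars.startswith
              ((PySem.Str.slice content (some i) none).toList.dropWhile (· = '\n'))
              ("class ".toList) = true ∧ depth ≤ 1) := by
            rw [hrest]
            intro hh
            exact hcond ⟨(PySem.Chars.startswith_iff _ _).mp hh.1, hh.2⟩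
          rw [if_neg hbool]
          rw [ih (i + 1) depth (by omega) hdrop']
          have hcut : pvCut depth ('\n' :: t')
              = (pvCut depth t').map (· + 1) := by
            simp only [pvCut]
            rw [if_neg (by intro hh; exact hcond hh.2), if_neg (by decide)]
            simp
          rw [hcut]
          cases hv : pvCut depth t' with
          | none => simp [hv]
          | some j =>
            simp only [hv, Option.map_some]
            have : (i + 1).toNat - start.toNat + j = i.toNat - start.toNat + (j + 1) := by omega
            rw [this]
      · rw [if_neg hc, if_neg hn]
        rw [ih (i + 1) depth (by omega) hdrop']
        have hcut : pvCut depth (c :: t') = (pvCut depth t').map (· + 1) := by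
          simp only [pvCut]
          rw [if_neg (by intro hh; exact hn hh.1), if_neg hc]
          simp
        rw [hcut]
        cases hv : pvCut depth t' with
        | none => simp [hv]
        | some j =>
          simp only [hv, Option.map_some]
          have : (i + 1).toNat - start.toNat + j = i.toNat - start.toNat + (j + 1) := by omega
          rw [this]

-- ---- B side ----

lemma pvFirstNonempty_eq (Ls : List (List Char)) :
    pvFirstNonempty (Ls.map String.ofList) = String.ofList (pvFirstNE Ls) := by
  induction Ls with
  | nil => simp [pvFirstNonempty, pvFirstNE]
  | cons l ls ih =>
    simp only [List.map_cons, pvFirstNonempty, pvFirstNE]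
    by_cases hl : l = []
    · subst hl
      simp [ih]
    · rw [if_pos (by simp [← String.toList_inj] ; exact hl), if_neg hl]

lemma pvSliceTo_eq (S : String) (b : Int) (hb : 0 ≤ b) :
    PySem.Str.slice S none (some b) = String.ofList (S.toList.take b.toNat) := by
  rw [← String.toList_inj, PySem.Str.toList_slice]
  simp only [PySem.Chars.slice_eq_listSlice]
  rw [PySem.List.slice_to _ hb]
  simp

lemma pvBLoop_eq (S : String) : ∀ (Ls : List (List Char)) (depth : Int) (taken : Nat),
    pvBLoop S depth (taken : Int) (Ls.map String.ofList) =
      match pvCutL depth Ls with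
      | some j => String.ofList (S.toList.take (taken + j))
      | none => S := by
  intro Ls
  induction Ls with
  | nil => intro depth taken; simp [pvBLoop, pvCutL]
  | cons l ls ih =>
    intro depth taken
    cases ls with
    | nil => simp [pvBLoop, pvCutL]
    | cons m ms =>
      have hcount : (PySem.Str.count (String.ofList l) ":" : Int) = (l.count ':' : Int) := by
        have : (String.ofList l).toList = l := String.toList_ofList
        simp [PySem.Str.count, this, show (":" : String).toList = [':'] from rfl, pvCount_eq]
      have hnxt : pvFirstNonempty ((m :: ms).map String.ofList)
          = String.ofList (pvFirstNE (m :: ms)) := pvFirstNonempty_eq _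
      simp only [List.map_cons] at hnxt
      have hsw : (PySem.Str.startswith (String.ofList (pvFirstNE (m :: ms))) "class " = true)
          ↔ "class ".toList <+: pvFirstNE (m :: ms) := by
        rw [PySem.Str.startswith]
        rw [String.toList_ofList]
        exact PySem.Chars.startswith_iff _ _
      simp only [List.map_cons, pvBLoop, hnxt, hcount]
      by_cases hcond : "class ".toList <+: pvFirstNE (m :: ms) ∧ depth + (l.count ':' : Int) ≤ 1
      · rw [if_pos ⟨hsw.mpr hcond.1, hcond.2⟩]
        have hlen : PySem.Str.len (String.ofList l) = (l.length : Int) := by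
          simp [PySem.Str.len, String.toList_ofList]
        rw [hlen, pvSliceTo_eq S _ (by omega)]
        simp only [pvCutL]
        rw [if_pos hcond]
        have hton : ((taken : Int) + (l.length : Int)).toNat = taken + l.length := by omega
        rw [hton]
      · rw [if_neg (by intro hh; exact hcond ⟨hsw.mp hh.1, hh.2⟩)]
        have hlen : PySem.Str.len (String.ofList l) = (l.length : Int) := by
          simp [PySem.Str.len, String.toList_ofList]
        rw [hlen]
        have harg : (taken : Int) + (l.length : Int) + 1 = ((taken + l.length + 1 : Nat) : Int) := by
          push_cast; ring
        rw [harg]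
        have hih := ih (depth + (l.count ':' : Int)) (taken + l.length + 1)
        simp only [List.map_cons] at hih
        rw [hih]
        simp only [pvCutL]
        rw [if_neg hcond]
        cases hv : pvCutL (depth + (l.count ':' : Int)) (m :: ms) with
        | none => simp [hv]
        | some j =>
          simp only [hv, Option.map_some]
          have : taken + l.length + 1 + j = taken + (j + (l.length + 1)) := by omega
          rw [this]

-- ---- assembly ----

lemma pvA_final (content : String) (start : Int) (hs : 0 ≤ start) :
    extract_class_body_py content start =
      match pvCut 0 (content.toList.drop start.toNat) with
      | some j => String.ofList ((content.toList.drop start.toNat).take j)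
      | none => String.ofList (content.toList.drop start.toNat) := by
  unfold extract_class_body_py
  rw [pvALoop_eq content start hs (content.toList.drop start.toNat) start 0 le_rfl rfl]
  cases hv : pvCut 0 (content.toList.drop start.toNat) with
  | none => rfl
  | some j =>
    simp only []
    have h1 : start.toNat - start.toNat + j = j := by omega
    rw [h1]

lemma pvB_final (content : String) (start : Int) (hs : 0 ≤ start) :
    extract_class_body_py_alt content start =
      match pvCut 0 (content.toList.drop start.toNat) with
      | some j => String.ofList ((content.toList.drop start.toNat).take j)
      | none => String.ofList (content.toList.drop start.toNat) := by
  unfold extract_class_body_py_alt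
  simp only []
  have hsfx : (PySem.Str.slice content (some start) none).toList
      = content.toList.drop start.toNat := pvSliceFrom_eq content start hs
  rw [show ("\n" : String).toList = ['\n'] by decide, pvSplitOn_eq]
  rw [show (0 : Int) = ((0 : Nat) : Int) from rfl, pvBLoop_eq]
  simp only [Nat.cast_zero, Nat.zero_add]
  rw [hsfx]
  rw [← pvCut_eq_cutL _ 0 (pvSplit_nl_free _), pvJoin_split]
  cases hv : pvCut 0 (content.toList.drop start.toNat) with
  | none =>
    simp only []
    rw [← String.toList_inj, hsfx]
    simp
  | some j => rfl

-- ===== VERDICT (by name: the statement is the Claim_ definition above) =====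
theorem extract_class_body_py_spec : Claim_equal_extract_class_body_py := by
  intro content start _hdom hpre
  unfold Spec_extract_class_body_py
  have hs : 0 ≤ start := hpre
  rw [pvA_final content start hs, pvB_final content start hs]
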